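-- pv_equiv track=rewrite | github.com/shahidul034/Backlog-routine-web-app | app.py | course_name_return
-- ===== SOURCE A (Python) =====
-- def course_name_return(st):
--     temp = ""
--     flag = 0
--     for x in st:
--         if x == ')':
--             flag = 1
--         elif flag == 1:
--             temp += x
--     temp = temp.replace("\n", " ").split(" ")
--     temp = [x for x in temp if x != ""]
--     return ' '.join(temp)
-- ===== SOURCE B (Python) =====
-- def course_name_return(st):
--     tail = st.partition(')')[2]
--     words = tail.replace(')', '').replace('\n', ' ').split(' ')
--     return ' '.join(w for w in words if w)
-- ===== Notes on version B (the rewrite author's own statement) =====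
-- stated objective: faster
-- what changed: Replaces the char-by-char flag-accumulator loop with str.partition(')') to take the tail after the first ')', str.replace to drop remaining ')' and normalize newlines, and a split/filter/join pipeline.
import Mathlib
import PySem

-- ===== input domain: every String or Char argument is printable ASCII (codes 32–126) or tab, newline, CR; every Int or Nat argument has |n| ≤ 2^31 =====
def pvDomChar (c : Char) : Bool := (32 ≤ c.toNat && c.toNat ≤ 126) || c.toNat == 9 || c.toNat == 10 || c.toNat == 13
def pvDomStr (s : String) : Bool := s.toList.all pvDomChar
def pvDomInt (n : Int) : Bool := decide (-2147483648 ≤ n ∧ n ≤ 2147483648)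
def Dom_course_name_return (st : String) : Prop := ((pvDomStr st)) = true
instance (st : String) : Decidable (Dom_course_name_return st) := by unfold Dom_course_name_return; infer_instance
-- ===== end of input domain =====

-- B replaces A's char-by-char flag-accumulator loop with partition/replace/split/join string operations (idiomatic; same return value).

-- ===== PORT A =====
-- the loop body: 'if x == ")": flag = 1; elif flag == 1: temp += x'
def pvAStep (p : List Char × Int) (x : Char) : List Char × Int :=
  if x = ')' then (p.1, 1)
  else if p.2 = 1 then (p.1 ++ [x], p.2)
  else p

def course_name_return (st : String) : String :=
  let r := st.toList.foldl pvAStep ([], 0)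
  let temp := PySem.Chars.replace r.1 ['\n'] [' ']
  let parts := (PySem.Chars.splitOn temp [' ']).filter (fun x => x ≠ [])
  String.ofList (PySem.Chars.join [' '] parts)

-- ===== PORT B =====
-- hand port of the partition call taking the tail after the first close-paren (empty when there is none); exact
def pvPartTail : List Char → List Char
  | [] => []
  | c :: cs => if c = ')' then cs else pvPartTail cs

def course_name_return_alt (st : String) : String :=
  let tail := pvPartTail st.toList
  let ws := PySem.Chars.replace (PySem.Chars.replace tail [')'] []) ['\n'] [' ']
  let parts := (PySem.Chars.splitOn ws [' ']).filter (fun w => w ≠ [])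
  String.ofList (PySem.Chars.join [' '] parts)

-- ===== PRECONDITION & SPEC =====
def Spec_course_name_return (st : String) (out : String) : Prop := out = course_name_return_alt st
instance (st : String) (out : String) : Decidable (Spec_course_name_return st out) := by unfold Spec_course_name_return; infer_instance

-- ===== CLAIM (what is proved, stated in full; the proofs are below) =====
def Claim_equal_course_name_return : Prop := ∀ (st : String), Dom_course_name_return st → Spec_course_name_return st (course_name_return st)

-- ===== LEMMAS AND PROOFS =====
-- replace with a single-char pattern and empty replacement is a filter
lemma replace_go_single (c : Char) : ∀ (fuel : Nat) (l acc : List Char), l.length ≤ fuel →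
    PySem.Chars.replace.go [c] [] fuel l acc = acc.reverse ++ l.filter (fun x => x ≠ c) := by
  intro fuel
  induction fuel with
  | zero =>
    intro l acc h
    have : l = [] := List.eq_nil_of_length_eq_zero (Nat.le_zero.mp h)
    subst this
    simp [PySem.Chars.replace.go]
  | succ n ih =>
    intro l acc h
    cases l with
    | nil => simp [PySem.Chars.replace.go]
    | cons a t =>
      have h' : t.length ≤ n := by simpa using h
      by_cases hc : a = c
      · subst hc
        simp [PySem.Chars.replace.go, List.isPrefixOf, ih _ _ h', List.filter]
      · simp [PySem.Chars.replace.go, List.isPrefixOf, Ne.symm hc, ih _ _ h', List.filter, hc]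

lemma replace_single_empty (cs : List Char) (c : Char) :
    PySem.Chars.replace cs [c] [] = cs.filter (fun x => x ≠ c) := by
  simp [PySem.Chars.replace, replace_go_single c cs.length cs [] le_rfl]

lemma foldl_flag1 (s : List Char) : ∀ acc : List Char,
    s.foldl pvAStep (acc, 1) = (acc ++ s.filter (fun x => x ≠ ')'), 1) := by
  induction s with
  | nil => intro acc; simp
  | cons a t ih =>
    intro acc
    by_cases ha : a = ')'
    · subst ha; simp [pvAStep, ih, List.filter]
    · simp [pvAStep, ha, ih, List.filter]

lemma foldl_flag0 (s : List Char) : ∀ acc : List Char,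
    (s.foldl pvAStep (acc, 0)).1 = acc ++ (pvPartTail s).filter (fun x => x ≠ ')') := by
  induction s with
  | nil => intro acc; simp [pvPartTail]
  | cons a t ih =>
    intro acc
    by_cases ha : a = ')'
    · subst ha; simp [pvAStep, pvPartTail, foldl_flag1]
    · simp [pvAStep, ha, pvPartTail, ih]

-- ===== VERDICT (by name: the statement is the Claim_ definition above) =====
theorem course_name_return_spec : Claim_equal_course_name_return := by
  intro st _
  show course_name_return st = course_name_return_alt st
  simp only [course_name_return, course_name_return_alt]
  rw [replace_single_empty, foldl_flag0]
  simp
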